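-- pv_equiv track=rewrite | github.com/loadshare/archestra | .github/scripts/check-supply-chain-policy.py | has_inline_or_previous_marker
-- ===== SOURCE A (Python) =====
-- def has_inline_or_previous_marker(
--     lines: list[str], index: int, marker: str
-- ) -> bool:
--     if marker in lines[index]:
--         return True
--
--     previous_index = index - 1
--     remaining_lines = 8
--     while previous_index >= 0 and remaining_lines > 0:
--         previous_line = lines[previous_index].strip()
--         if not previous_line:
--             previous_index -= 1
--             continue
--         if marker in previous_line:
--             return True
--         previous_index -= 1
--         remaining_lines -= 1
--
--     return False
-- ===== SOURCE B (Python) =====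
-- def has_inline_or_previous_marker(
--     lines: list[str], index: int, marker: str
-- ) -> bool:
--     if marker in lines[index]:
--         return True
--     nonblank = [l.strip() for l in lines[:index] if l.strip()]
--     return any(marker in s for s in nonblank[-8:])
-- ===== Notes on version B (the rewrite author's own statement) =====
-- stated objective: simpler
-- what changed: Replaces the backward index-walking while-loop with its two counters by building the stripped non-blank prefix of lines[:index] once and doing a single any() pass over its last 8 elements; Pre_ excludes out-of-range indices (A raises IndexError) and negative in-range indices, an unspecified corner where Python's wraparound makes A check only the wrapped inline line while B also scans the lines preceding it -- both readings are defensible.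
-- outside the precondition, e.g. on has_inline_or_previous_marker(['m', 'x'], -1, 'm'): A returns False, B returns True
import Mathlib
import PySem

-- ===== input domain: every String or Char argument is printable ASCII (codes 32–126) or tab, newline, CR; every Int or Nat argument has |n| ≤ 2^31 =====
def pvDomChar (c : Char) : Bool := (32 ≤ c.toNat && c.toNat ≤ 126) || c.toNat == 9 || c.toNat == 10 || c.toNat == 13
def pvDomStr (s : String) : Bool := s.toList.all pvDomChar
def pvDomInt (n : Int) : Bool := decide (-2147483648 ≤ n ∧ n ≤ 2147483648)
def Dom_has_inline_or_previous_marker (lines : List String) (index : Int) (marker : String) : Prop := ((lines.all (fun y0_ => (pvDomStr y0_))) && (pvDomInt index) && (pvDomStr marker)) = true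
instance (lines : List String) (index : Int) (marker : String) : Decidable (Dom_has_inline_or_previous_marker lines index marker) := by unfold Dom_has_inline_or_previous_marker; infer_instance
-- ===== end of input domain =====

-- B replaces A's backward index-walking while-loop (two counters) by one any pass
-- over the last 8 stripped non-blank lines of lines[:index] — a simpler decomposition.


-- ===== PORT A =====
-- A's while-loop: previous_index / remaining_lines walk backwards, skipping blank lines.
def pvLoopA (lines : List String) (marker : String) (pi : Int) (rem : Int) : Bool :=
  if h : 0 ≤ pi ∧ 0 < rem then
    let previous_line := PySem.Str.strip ((PySem.List.pyGet? lines pi).getD "")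
    if previous_line = "" then
      pvLoopA lines marker (pi - 1) rem
    else if PySem.Str.isIn marker previous_line then
      true
    else
      pvLoopA lines marker (pi - 1) (rem - 1)
  else
    false
termination_by (pi + 1).toNat
decreasing_by all_goals omega

def has_inline_or_previous_marker (lines : List String) (index : Int) (marker : String) : Bool :=
  if PySem.Str.isIn marker ((PySem.List.pyGet? lines index).getD "") then
    true
  else
    pvLoopA lines marker (index - 1) 8

-- ===== PORT B =====
def has_inline_or_previous_marker_alt (lines : List String) (index : Int) (marker : String) : Bool :=
  if PySem.Str.isIn marker ((PySem.List.pyGet? lines index).getD "") then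
    true
  else
    -- nonblank = [l.strip() for l in lines[:index] if l.strip()]; any(marker in s for s in nonblank[-8:])
    (PySem.List.slice
        (((PySem.List.slice lines none (some index)).filter
            (fun l => !decide (PySem.Str.strip l = ""))).map PySem.Str.strip)
        (some (-8)) none).any (fun s => PySem.Str.isIn marker s)

-- ===== PRECONDITION & SPEC =====
-- Pre_ excludes out-of-range indices (A raises IndexError) and negative in-range indices,
-- an unspecified corner where Python's wraparound makes A check only the wrapped inline line
-- while B also scans the lines preceding it — both readings are defensible.
def Pre_has_inline_or_previous_marker (lines : List String) (index : Int) (marker : String) : Prop :=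
  0 ≤ index ∧ index < (lines.length : Int)
instance (lines : List String) (index : Int) (marker : String) : Decidable (Pre_has_inline_or_previous_marker lines index marker) := by unfold Pre_has_inline_or_previous_marker; infer_instance

def pvWitness_has_inline_or_previous_marker : List String × Int × String := (["m", "x"], 1, "m")

def Spec_has_inline_or_previous_marker (lines : List String) (index : Int) (marker : String) (out : Bool) : Prop := out = has_inline_or_previous_marker_alt lines index marker
instance (lines : List String) (index : Int) (marker : String) (out : Bool) : Decidable (Spec_has_inline_or_previous_marker lines index marker out) := by unfold Spec_has_inline_or_previous_marker; infer_instance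

-- ===== CLAIM (what is proved, stated in full; the proofs are below) =====
def Claim_equal_has_inline_or_previous_marker : Prop := ∀ (lines : List String) (index : Int) (marker : String), Dom_has_inline_or_previous_marker lines index marker → Pre_has_inline_or_previous_marker lines index marker → Spec_has_inline_or_previous_marker lines index marker (has_inline_or_previous_marker lines index marker)

-- ===== LEMMAS AND PROOFS =====

-- the filter/map pipeline B builds, as a function of the prefix of lines
def pvNB (pref : List String) : List String :=
  (pref.filter (fun l => !decide (PySem.Str.strip l = ""))).map PySem.Str.strip

-- A's loop started at n-1 scans the reversed non-blank pipeline of the first n lines,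
-- looking at at most rem of them.
theorem pvLoopA_eq (lines : List String) (marker : String) :
    ∀ (n : Nat), n ≤ lines.length → ∀ (rem : Int),
      pvLoopA lines marker ((n : Int) - 1) rem
        = (((pvNB (lines.take n)).reverse.take rem.toNat).any
            (fun s => PySem.Str.isIn marker s)) := by
  intro n
  induction n with
  | zero =>
      intro _ rem
      rw [pvLoopA]
      simp [pvNB]
  | succ k ih =>
      intro hlen rem
      have hk : k < lines.length := by omega
      have hpi : ((k + 1 : Nat) : Int) - 1 = (k : Int) := by push_cast; ring
      rw [pvLoopA, hpi]
      by_cases hrem : 0 < rem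
      · rw [dif_pos ⟨by positivity, hrem⟩]
        have hget : (PySem.List.pyGet? lines (k : Int)).getD "" = lines[k] := by
          rw [PySem.List.pyGet?_natCast, List.getElem?_eq_getElem hk]
          rfl
        have htake : lines.take (k + 1) = lines.take k ++ [lines[k]] := by
          rw [List.take_add_one, List.getElem?_eq_getElem hk]
          rfl
        have hNB : pvNB (lines.take (k + 1))
            = pvNB (lines.take k)
              ++ (if PySem.Str.strip lines[k] = "" then []
                  else [PySem.Str.strip lines[k]]) := by
          rw [htake]
          unfold pvNB
          rw [List.filter_append, List.map_append]
          by_cases hs : PySem.Str.strip lines[k] = "" <;> simp [hs]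
        rw [hget]
        by_cases hs : PySem.Str.strip lines[k] = ""
        · rw [if_pos hs, hNB, if_pos hs, List.append_nil]
          exact ih (by omega) rem
        · rw [if_neg hs, hNB, if_neg hs, List.reverse_append]
          have hm : ∃ m : Nat, rem.toNat = m + 1 := ⟨rem.toNat - 1, by omega⟩
          obtain ⟨m, hm⟩ := hm
          rw [hm]
          simp only [List.reverse_cons, List.reverse_nil, List.nil_append,
            List.cons_append, List.take_succ_cons, List.any_cons]
          by_cases hin : PySem.Str.isIn marker (PySem.Str.strip lines[k]) = true
          · rw [if_pos hin, hin, Bool.true_or]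
          · rw [if_neg hin, ih (by omega) (rem - 1)]
            have : (rem - 1).toNat = m := by omega
            rw [this]
            cases h' : PySem.Str.isIn marker (PySem.Str.strip lines[k]) with
            | true => exact absurd h' hin
            | false => rw [Bool.false_or]
      · rw [dif_neg (by omega)]
        have : rem.toNat = 0 := by omega
        rw [this]
        simp
-- any over the last k elements equals any over the first k of the reverse
theorem pv_any_drop_eq_take_reverse (l : List String) (k : Nat) (p : String → Bool) :
    (l.drop (l.length - k)).any p = (l.reverse.take k).any p := by
  rw [List.take_reverse, List.any_reverse]

-- ===== VERDICT (by name: the statement is the Claim_ definition above) =====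
theorem has_inline_or_previous_marker_spec : Claim_equal_has_inline_or_previous_marker := by
  intro lines index marker _ hpre
  obtain ⟨h0, hlt⟩ := hpre
  unfold Spec_has_inline_or_previous_marker
  unfold has_inline_or_previous_marker has_inline_or_previous_marker_alt
  have key : pvLoopA lines marker (index - 1) 8
      = (PySem.List.slice
          (((PySem.List.slice lines none (some index)).filter
              (fun l => !decide (PySem.Str.strip l = ""))).map PySem.Str.strip)
          (some (-8)) none).any (fun s => PySem.Str.isIn marker s) := by
    rw [PySem.List.slice_to (hb := h0), PySem.List.slice_some_none,
      PySem.List.clampIdx_neg_ofNat _ 8 (by omega)]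
    have hn : index = ((index.toNat : Nat) : Int) := by omega
    rw [hn, pvLoopA_eq lines marker index.toNat (by omega) 8]
    show (((pvNB (lines.take index.toNat)).reverse.take (8 : Int).toNat).any
            (fun s => PySem.Str.isIn marker s))
        = ((pvNB (lines.take index.toNat)).drop
            ((pvNB (lines.take index.toNat)).length - 8)).any
            (fun s => PySem.Str.isIn marker s)
    rw [pv_any_drop_eq_take_reverse]
    rfl
  rw [key]
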